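-- pv_equiv track=rewrite | github.com/harkabeeparolus/kodkalender-2020 | dag_21.py | is_rainbow_number
-- ===== SOURCE A (Python) =====
-- import itertools
--
-- def pairwise(iterable):
--     "Collect data into pairs"
--     # s -> (s0,s1), (s1,s2), (s2, s3), ...
--     # https://docs.python.org/3/library/itertools.html#itertools-recipes
--     a, b = itertools.tee(iterable)
--     next(b, None)
--     return zip(a, b)
--
-- def is_rainbow_number(number: int) -> bool:
--     """Rainbow number is a palindrome, starts and ends with 1, and numbers
--     increase in sequence by 0 or 1."""
--
--     num_str = str(number)
--
--     palindrome = num_str == num_str[::-1]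
--     has_ones = num_str[0] == num_str[-1] == "1"
--
--     half_length = len(num_str) // 2
--     half = num_str[:-half_length]
--     pairs = [map(int, pair) for pair in pairwise(half)]
--     in_sequence = all(0 <= (b - a) <= 1 for a, b in pairs)
--
--     return palindrome and has_ones and in_sequence
-- ===== SOURCE B (Python) =====
-- def _rainbow_core(s, prev):
--     """Recursive two-end peel: s is a rainbow core iff its first and last chars
--     match, the first digit extends prev by 0 or 1, and the inside is a core."""
--     if not s:
--         return True
--     d = int(s[0])
--     if prev is not None and not (0 <= d - prev <= 1):
--         return False
--     if len(s) == 1: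
--         return True
--     if s[0] != s[-1]:
--         return False
--     return _rainbow_core(s[1:-1], d)
--
--
-- def is_rainbow_number(number: int) -> bool:
--     """Rainbow check by recursion that peels one char off each end at a time,
--     verifying mirror equality and the 0/1 digit step together."""
--     s = str(number)
--     if s[0] != "1" or s[-1] != "1":
--         return False
--     return _rainbow_core(s, None)
-- ===== Notes on version B (the rewrite author's own statement) =====
-- stated objective: alternative
-- what changed: B replaces A's three separate whole-string scans (string-reversal compare, chained endpoint test, and a pairwise/tee/zip pass over a slice) with a single recursion that peels one character off each end of the digit string, checking the mirror equality and the 0/1 digit step together as it descends to the middle.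
-- outside the precondition, e.g. on is_rainbow_number(-10): A raises ValueError, B returns False
import Mathlib
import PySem

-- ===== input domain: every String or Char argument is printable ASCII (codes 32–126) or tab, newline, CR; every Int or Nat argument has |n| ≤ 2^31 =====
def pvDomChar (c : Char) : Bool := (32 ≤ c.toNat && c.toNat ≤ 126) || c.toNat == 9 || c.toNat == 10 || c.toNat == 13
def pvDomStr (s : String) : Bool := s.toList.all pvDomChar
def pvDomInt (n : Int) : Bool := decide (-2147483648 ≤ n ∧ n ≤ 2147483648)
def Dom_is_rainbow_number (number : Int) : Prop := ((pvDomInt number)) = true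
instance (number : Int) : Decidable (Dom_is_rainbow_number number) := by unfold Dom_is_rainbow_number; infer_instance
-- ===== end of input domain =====

-- B replaces A's three separate scans (reversal compare, chained endpoint test, pairwise pass
-- over a slice) by a recursion that peels one char off each end, checking the mirror equality
-- and the 0/1 digit step together; equivalent on number > -10 (A raises ValueError below).


-- ===== PORT A =====
-- int(c) for a single character c; the default 0 is unreachable under Pre_ (Python raises
-- ValueError exactly where ofChars? is none, i.e. on the '-' of numbers ≤ -10).
def pvCharInt (c : Char) : Int := (PySem.Int.ofChars? [c]).getD 0

-- the test `0 <= (b - a) <= 1` (shared text of both Pythons)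
def pvPairOk (a b : Char) : Bool := decide (0 ≤ pvCharInt b - pvCharInt a ∧ pvCharInt b - pvCharInt a ≤ 1)

-- body of A on num_str = str(number); pairwise(half) is zip(half, half[1:]) = half.zip half.tail;
-- s[::-1] via slice? (getD unreachable: step -1 ≠ 0); s[0], s[-1] never raise (str(int) nonempty)
def pvRainbowA (s : List Char) : Bool :=
  let palindrome := s == (PySem.List.slice? s none none (-1)).getD []
  let has_ones := (PySem.List.pyGetD s 0 ' ' == PySem.List.pyGetD s (-1) ' ') &&
                  (PySem.List.pyGetD s (-1) ' ' == '1')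
  let halfLength : Int := PySem.Int.floordiv ((s.length : Int)) 2
  let half := PySem.List.slice s none (some (-halfLength))
  let pairs := half.zip half.tail
  let in_sequence := pairs.all fun p => pvPairOk p.1 p.2
  palindrome && has_ones && in_sequence

def is_rainbow_number (number : Int) : Bool := pvRainbowA (PySem.Int.toChars number)

-- ===== PORT B =====
-- s[1:-1] for nonempty s (cited by the port's termination proof)
lemma pv_slice_mid (c : Char) (rest : List Char) :
    PySem.List.slice (c :: rest) (some 1) (some (-1)) = rest.dropLast := by
  simp [PySem.List.slice, PySem.List.clampIdx, List.dropLast_eq_take]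
  rw [if_neg (by omega)]
  simp

-- _rainbow_core(s, prev): recursive two-end peel (B's helper, step for step)
def pvRainbowCore (s : List Char) (prev : Option Int) : Bool :=
  match s with
  | [] => true
  | c :: rest =>
    let d := pvCharInt c
    if (match prev with
        | some p => !decide (0 ≤ d - p ∧ d - p ≤ 1)
        | none => false) then false
    else if rest.length = 0 then true
    else if c != PySem.List.pyGetD (c :: rest) (-1) ' ' then false
    else pvRainbowCore (PySem.List.slice (c :: rest) (some 1) (some (-1))) (some d)
termination_by s.length
decreasing_by
  rw [pv_slice_mid]
  simp [List.length_dropLast]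

-- body of B on s = str(number): endpoint guard, then the recursive core
def is_rainbow_number_alt (number : Int) : Bool :=
  let s := PySem.Int.toChars number
  if PySem.List.pyGetD s 0 ' ' != '1' || PySem.List.pyGetD s (-1) ' ' != '1' then false
  else pvRainbowCore s none

-- ===== PRECONDITION & SPEC =====
-- Pre_ excludes exactly number ≤ -10, where Python A raises ValueError (int('-') on the sign
-- character while scanning the pairs of the half-string).
def Pre_is_rainbow_number (number : Int) : Prop := -10 < number
instance (number : Int) : Decidable (Pre_is_rainbow_number number) := by unfold Pre_is_rainbow_number; infer_instance
def pvWitness_is_rainbow_number : Int := 121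

def Spec_is_rainbow_number (number : Int) (out : Bool) : Prop := out = is_rainbow_number_alt number
instance (number : Int) (out : Bool) : Decidable (Spec_is_rainbow_number number out) := by unfold Spec_is_rainbow_number; infer_instance

-- ===== CLAIM (what is proved, stated in full; the proofs are below) =====
def Claim_equal_is_rainbow_number : Prop := ∀ (number : Int), Dom_is_rainbow_number number → Pre_is_rainbow_number number → Spec_is_rainbow_number number (is_rainbow_number number)

-- ===== LEMMAS AND PROOFS =====

-- the three indexed conditions both programs decide
def pvPalC (s : List Char) : Prop :=
  ∀ k, k < s.length / 2 → s.getD k ' ' = s.getD (s.length - 1 - k) ' '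
def pvIncC (s : List Char) : Prop :=
  ∀ k, k + 1 < s.length - s.length / 2 → pvPairOk (s.getD k ' ') (s.getD (k + 1) ' ') = true
def pvPrevC (s : List Char) (prev : Option Int) : Prop :=
  ∀ p, prev = some p → s ≠ [] →
    (0 ≤ pvCharInt (s.getD 0 ' ') - p ∧ pvCharInt (s.getD 0 ' ') - p ≤ 1)

-- s.getD j ' ' is s[j] when in range
lemma pv_getD_eq (s : List Char) (j : Nat) (hj : j < s.length) : s.getD j ' ' = s[j]'hj := by
  rw [List.getD_eq_getElem?_getD, List.getElem?_eq_getElem hj]; rfl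

-- index congruence for getElem
lemma pv_getElem_idx (s : List Char) (i j : Nat) (h : i = j) (hi : i < s.length) :
    s[i]'hi = s[j]'(h ▸ hi) := by subst h; rfl

-- A's pairwise pass over t, pointwise
lemma pv_zip_tail_all (t : List Char) (f : Char → Char → Bool) :
    ((t.zip t.tail).all fun p => f p.1 p.2) = true ↔
      ∀ k (h : k + 1 < t.length), f (t[k]'(by omega)) (t[k + 1]'h) = true := by
  simp only [List.all_eq_true]
  constructor
  · intro h k hk
    have hk' : k < (t.zip t.tail).length := by
      simp [List.length_zip, List.length_tail]; omega
    have := h (t.zip t.tail)[k] (List.getElem_mem hk')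
    simpa [List.getElem_zip, List.getElem_tail] using this
  · intro h p hp
    obtain ⟨k, hk, rfl⟩ := List.mem_iff_getElem.1 hp
    have hk' : k + 1 < t.length := by
      simp [List.length_zip, List.length_tail] at hk; omega
    simpa [List.getElem_zip, List.getElem_tail] using h k hk'

-- palindromicity is determined by the first half
lemma pv_palindrome_iff_half (s : List Char) : s = s.reverse ↔ pvPalC s := by
  constructor
  · intro h k hk
    rw [pv_getD_eq s k (by omega), pv_getD_eq s _ (by omega)]
    have h1 := List.getElem_of_eq h (show k < s.length by omega)
    rw [h1]
    simp [List.getElem_reverse]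
  · intro h
    apply List.ext_getElem (by simp)
    intro i hi hi'
    simp only [List.getElem_reverse]
    by_cases hmid : i = s.length - 1 - i
    · exact pv_getElem_idx s i (s.length - 1 - i) hmid hi
    · by_cases hlo : i < s.length / 2
      · have := h i hlo
        rwa [pv_getD_eq s i (by omega), pv_getD_eq s _ (by omega)] at this
      · have hk : s.length - 1 - i < s.length / 2 := by omega
        have h2 := h (s.length - 1 - i) hk
        rw [pv_getD_eq s _ (by omega), pv_getD_eq s _ (by omega)] at h2
        have he : s.length - 1 - (s.length - 1 - i) = i := by omega
        rw [pv_getElem_idx s _ _ he (by omega)] at h2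
        exact h2.symm

-- A's in_sequence over half = s[:-(n//2)] is pvIncC
lemma pv_inseq_iff (s : List Char) (hs : s ≠ []) :
    (((PySem.List.slice s none (some (-(PySem.Int.floordiv ((s.length : Int)) 2)))).zip
        (PySem.List.slice s none (some (-(PySem.Int.floordiv ((s.length : Int)) 2)))).tail).all
      fun p => pvPairOk p.1 p.2) = true ↔ pvIncC s := by
  have hn : 0 < s.length := List.length_pos_iff.2 hs
  have hfd : PySem.Int.floordiv ((s.length : Int)) 2 = ((s.length / 2 : Nat) : Int) :=
    PySem.Int.floordiv_natCast s.length 2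
  rw [hfd]
  rcases Nat.eq_zero_or_pos (s.length / 2) with h0 | hpos
  · -- one-digit string: slicing with -0 keeps all of s, but there are no pairs either way
    have hone : s.length = 1 := by omega
    obtain ⟨c, rfl⟩ := List.length_eq_one_iff.1 hone
    simp [pvIncC]
    intro a b hab
    simp [PySem.List.slice, PySem.List.clampIdx] at hab
  · have hhalf : PySem.List.slice s none (some (-(((s.length / 2 : Nat) : Int)))) =
        s.take (s.length - s.length / 2) :=
      PySem.List.slice_to_neg_natCast s (s.length / 2) hpos
    rw [hhalf, pv_zip_tail_all]
    have hmlen : (s.take (s.length - s.length / 2)).length = s.length - s.length / 2 := by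
      rw [List.length_take]; omega
    unfold pvIncC
    simp only [hmlen]
    constructor
    · intro h k hk
      have h3 := h k hk
      simp only [List.getElem_take] at h3
      rw [pv_getD_eq s k (by omega), pv_getD_eq s (k + 1) (by omega)]
      exact h3
    · intro h k hk
      have h3 := h k hk
      rw [pv_getD_eq s k (by omega), pv_getD_eq s (k + 1) (by omega)] at h3
      simpa [List.getElem_take] using h3

-- A, characterized: palindrome ∧ endpoints ∧ increments
lemma pvA_iff (s : List Char) (hs : s ≠ []) :
    pvRainbowA s = true ↔
      (pvPalC s ∧ (s.getD 0 ' ' = s.getLast hs ∧ s.getLast hs = '1') ∧ pvIncC s) := by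
  have hn : 0 < s.length := List.length_pos_iff.2 hs
  unfold pvRainbowA
  rw [PySem.List.slice?_none_none_neg_one]
  simp only [Option.getD_some]
  rw [PySem.List.pyGetD_neg_one s ' ' hs, PySem.List.pyGetD_zero]
  simp only [Bool.and_eq_true, beq_iff_eq]
  rw [pv_inseq_iff s hs, ← pv_palindrome_iff_half]
  tauto

-- getD over c :: mid ++ [z]
lemma pv_getD_mid (c z : Char) (mid : List Char) (k : Nat) (hk : k < mid.length) :
    (c :: (mid ++ [z])).getD (k + 1) ' ' = mid.getD k ' ' := by
  rw [List.getD_cons_succ, pv_getD_eq _ k (by simp; omega), pv_getD_eq mid k hk]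
  rw [List.getElem_append_left hk]

lemma pv_getD_last (c z : Char) (mid : List Char) :
    (c :: (mid ++ [z])).getD (mid.length + 1) ' ' = z := by
  rw [List.getD_cons_succ, pv_getD_eq _ mid.length (by simp)]
  simp

-- B's recursive core, characterized
lemma pv_core_iff_aux (N : Nat) : ∀ (s : List Char), s.length ≤ N → ∀ (prev : Option Int),
    (pvRainbowCore s prev = true ↔ (pvPalC s ∧ pvIncC s ∧ pvPrevC s prev)) := by
  induction N with
  | zero =>
    intro s hs prev
    have : s = [] := by
      cases s with
      | nil => rfl
      | cons a t => simp at hs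
    subst this
    rw [pvRainbowCore.eq_def]
    simp [pvPalC, pvIncC, pvPrevC]
  | succ N ih =>
    intro s hs prev
    cases s with
    | nil =>
      rw [pvRainbowCore.eq_def]
      simp [pvPalC, pvIncC, pvPrevC]
    | cons c rest =>
      rw [pvRainbowCore.eq_def]
      simp only []
      by_cases hbad : (match prev with
          | some p => !decide (0 ≤ pvCharInt c - p ∧ pvCharInt c - p ≤ 1)
          | none => false) = true
      · -- prev check fails: both sides false
        rw [if_pos hbad]
        cases prev with
        | none => simp at hbad
        | some p =>
          simp only [Bool.not_eq_eq_eq_not, Bool.not_true, decide_eq_false_iff_not] at hbad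
          constructor
          · intro h; simp at h
          · rintro ⟨-, -, hp⟩
            exact absurd (hp p rfl (by simp)) (by simpa using hbad)
      · rw [if_neg hbad]
        have hprev : pvPrevC (c :: rest) prev := by
          intro p hp _
          subst hp
          simp only [Bool.not_eq_eq_eq_not, Bool.not_true, decide_eq_false_iff_not,
            not_not] at hbad
          simpa using of_decide_eq_true (by simpa using hbad)
        cases rest with
        | nil =>
          simp only [List.length_nil, if_true]
          constructor
          · intro _
            refine ⟨?_, ?_, hprev⟩
            · intro k hk; simp at hk
            · intro k hk; simp at hk
          · intro _; trivial
        | cons r rs =>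
          have hne : (r :: rs).length ≠ 0 := by simp
          rw [if_neg hne]
          -- write rest = mid ++ [z]
          obtain ⟨mid, z, hmz⟩ : ∃ mid z, r :: rs = mid ++ [z] :=
            ⟨(r :: rs).dropLast, (r :: rs).getLast (by simp),
              (List.dropLast_append_getLast (by simp)).symm⟩
          rw [hmz] at hs hprev ⊢
          have hlen : (c :: (mid ++ [z])).length = mid.length + 2 := by simp
          have hlast : PySem.List.pyGetD (c :: (mid ++ [z])) (-1) ' ' = z := by
            rw [PySem.List.pyGetD_neg_one _ ' ' (by simp)]
            simp
          rw [hlast, pv_slice_mid]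
          have hdrop : (mid ++ [z]).dropLast = mid := by simp
          rw [hdrop]
          have hmlen : mid.length ≤ N := by simp at hs; omega
          by_cases hcz : c = z
          · have hcz' : (c != z) = false := by simp [hcz]
            rw [hcz', if_neg (by simp)]
            rw [ih mid hmlen (some (pvCharInt c))]
            constructor
            · rintro ⟨hpal, hinc, hlink⟩
              refine ⟨?_, ?_, hprev⟩
              · -- palindrome lifts
                intro k hk
                rw [hlen] at hk ⊢
                match k, hk with
                | 0, _ =>
                  have h0 : (c :: (mid ++ [z])).getD 0 ' ' = c := rfl
                  have hz : mid.length + 2 - 1 - 0 = mid.length + 1 := by omega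
                  rw [h0, hz, pv_getD_last]
                  exact hcz
                | (j+1), hk =>
                  have hj : j < mid.length / 2 := by omega
                  have hj1 : j < mid.length := by omega
                  have hj2 : mid.length - 1 - j < mid.length := by omega
                  have he : mid.length + 2 - 1 - (j + 1) = (mid.length - 1 - j) + 1 := by omega
                  rw [he, pv_getD_mid c z mid j hj1, pv_getD_mid c z mid _ hj2]
                  exact hpal j hj
              · -- increments lift
                intro k hk
                rw [hlen] at hk
                have hb : mid.length + 2 - (mid.length + 2) / 2 = mid.length - mid.length / 2 + 1 := by
                  omega
                rw [hb] at hk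
                match k, hk with
                | 0, hk =>
                  have hm1 : 0 < mid.length := by omega
                  have hmne : mid ≠ [] := by
                    intro h; rw [h] at hm1; simp at hm1
                  have hhead := hlink (pvCharInt c) rfl hmne
                  have h0 : (c :: (mid ++ [z])).getD 0 ' ' = c := rfl
                  rw [h0, pv_getD_mid c z mid 0 hm1]
                  unfold pvPairOk
                  exact decide_eq_true hhead
                | (j+1), hk =>
                  have hj1 : j + 1 < mid.length - mid.length / 2 := by omega
                  have hja : j < mid.length := by omega
                  have hjb : j + 1 < mid.length := by omega
                  rw [pv_getD_mid c z mid j hja, pv_getD_mid c z mid (j+1) hjb]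
                  exact hinc j hj1
            · rintro ⟨hpal, hinc, -⟩
              refine ⟨?_, ?_, ?_⟩
              · -- palindrome restricts
                intro k hk
                have hk2 : k + 1 < (c :: (mid ++ [z])).length / 2 := by rw [hlen]; omega
                have hh := hpal (k + 1) hk2
                rw [hlen] at hh
                have hj1 : k < mid.length := by omega
                have hj2 : mid.length - 1 - k < mid.length := by omega
                have he : mid.length + 2 - 1 - (k + 1) = (mid.length - 1 - k) + 1 := by omega
                rw [he, pv_getD_mid c z mid k hj1, pv_getD_mid c z mid _ hj2] at hh
                exact hh
              · -- increments restrict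
                intro k hk
                have hk2 : (k + 1) + 1 < (c :: (mid ++ [z])).length -
                    (c :: (mid ++ [z])).length / 2 := by rw [hlen]; omega
                have hh := hinc (k + 1) hk2
                have hja : k < mid.length := by omega
                have hjb : k + 1 < mid.length := by omega
                rw [pv_getD_mid c z mid k hja, pv_getD_mid c z mid (k+1) hjb] at hh
                exact hh
              · -- the prev link for the recursive call
                intro p hp hmne
                injection hp with hp
                subst hp
                have hm1 : 0 < mid.length := List.length_pos_iff.2 hmne
                have hk2 : 0 + 1 < (c :: (mid ++ [z])).length -
                    (c :: (mid ++ [z])).length / 2 := by rw [hlen]; omega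
                have hh := hinc 0 hk2
                have h0 : (c :: (mid ++ [z])).getD 0 ' ' = c := rfl
                rw [h0, pv_getD_mid c z mid 0 hm1] at hh
                exact of_decide_eq_true hh
          · -- ends differ: both sides false
            have hcz' : (c != z) = true := by simp [hcz]
            rw [hcz', if_pos rfl]
            constructor
            · intro h; simp at h
            · rintro ⟨hpal, -, -⟩
              exfalso
              have hk : 0 < (c :: (mid ++ [z])).length / 2 := by rw [hlen]; omega
              have hh := hpal 0 hk
              rw [hlen] at hh
              have h0 : (c :: (mid ++ [z])).getD 0 ' ' = c := rfl
              have hz : mid.length + 2 - 1 - 0 = mid.length + 1 := by omega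
              rw [h0, hz, pv_getD_last] at hh
              exact hcz hh

lemma pv_core_iff (s : List Char) (prev : Option Int) :
    pvRainbowCore s prev = true ↔ (pvPalC s ∧ pvIncC s ∧ pvPrevC s prev) :=
  pv_core_iff_aux s.length s le_rfl prev

-- the core equivalence, on any nonempty string str(number)
lemma pv_ab (s : List Char) (hs : s ≠ []) :
    pvRainbowA s =
      (if PySem.List.pyGetD s 0 ' ' != '1' || PySem.List.pyGetD s (-1) ' ' != '1' then false
       else pvRainbowCore s none) := by
  rw [PySem.List.pyGetD_neg_one s ' ' hs, PySem.List.pyGetD_zero]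
  by_cases h1 : s.getD 0 ' ' = '1'
  · by_cases h2 : s.getLast hs = '1'
    · have hg : (s.getD 0 ' ' != '1' || s.getLast hs != '1') = false := by
        rw [h1, h2]; simp
      rw [hg, if_neg (by simp)]
      rw [Bool.eq_iff_iff, pvA_iff s hs, pv_core_iff]
      unfold pvPrevC
      constructor
      · rintro ⟨hpal, -, hinc⟩
        exact ⟨hpal, hinc, by intro p hp; simp at hp⟩
      · rintro ⟨hpal, hinc, -⟩
        exact ⟨hpal, ⟨by rw [h1, h2], h2⟩, hinc⟩
    · have hg : (s.getD 0 ' ' != '1' || s.getLast hs != '1') = true := by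
        simp only [Bool.or_eq_true, bne_iff_ne, ne_eq]
        exact Or.inr h2
      rw [hg, if_pos rfl, Bool.eq_false_iff]
      intro h
      obtain ⟨-, ⟨-, hc⟩, -⟩ := (pvA_iff s hs).1 h
      exact h2 hc
  · have hg : (s.getD 0 ' ' != '1' || s.getLast hs != '1') = true := by
      simp only [Bool.or_eq_true, bne_iff_ne, ne_eq]
      exact Or.inl h1
    rw [hg, if_pos rfl, Bool.eq_false_iff]
    intro h
    obtain ⟨-, ⟨hc, hc'⟩, -⟩ := (pvA_iff s hs).1 h
    exact h1 (hc.trans hc')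

-- str(n) is never the empty string
lemma pv_toChars_ne_nil (n : Int) : PySem.Int.toChars n ≠ [] := by
  unfold PySem.Int.toChars
  split
  · simp
  · intro h
    have hpos : 0 < (Nat.toDigits 10 n.toNat).length := Nat.length_toDigits_pos
    simp [h] at hpos

-- ===== VERDICT (by name: the statement is the Claim_ definition above) =====
theorem is_rainbow_number_spec : Claim_equal_is_rainbow_number := by
  intro number _ _
  unfold Spec_is_rainbow_number is_rainbow_number is_rainbow_number_alt
  exact pv_ab _ (pv_toChars_ne_nil number)
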